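-- pv_equiv track=rewrite | github.com/leeminHong1990/WenZhouMJ | scripts/common/utility.py | checkIs8Pairs
-- ===== SOURCE A (Python) =====
-- def getTile2NumDict(tiles):
-- 	tile2NumDict = {}
-- 	for t in tiles:
-- 		if t not in tile2NumDict:
-- 			tile2NumDict[t] = 1
-- 		else:
-- 			tile2NumDict[t] += 1
-- 	return tile2NumDict
--
-- def checkIs8Pairs(handTilesButKing, kingTilesNum):
-- 	tile2NumDict = getTile2NumDict(handTilesButKing)
-- 	needNum = 0
-- 	for tile in tile2NumDict:
-- 		num = tile2NumDict[tile]
-- 		if num%2 == 1: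
-- 			needNum += 1
-- 	if needNum - kingTilesNum <= 1:
-- 		return True
-- 	return False
-- ===== SOURCE B (Python) =====
-- def checkIs8Pairs(handTilesButKing, kingTilesNum):
-- 	oddSet = set()
-- 	for t in handTilesButKing:
-- 		if t in oddSet:
-- 			oddSet.discard(t)
-- 		else:
-- 			oddSet.add(t)
-- 	return len(oddSet) - kingTilesNum <= 1
-- ===== Notes on version B (the rewrite author's own statement) =====
-- stated objective: simpler
-- what changed: Replaces the frequency dict and its second key-scanning loop with a single pass maintaining a set of tiles seen an odd number of times (toggle in/out), whose size is the number of unpaired tiles.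
import Mathlib
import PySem

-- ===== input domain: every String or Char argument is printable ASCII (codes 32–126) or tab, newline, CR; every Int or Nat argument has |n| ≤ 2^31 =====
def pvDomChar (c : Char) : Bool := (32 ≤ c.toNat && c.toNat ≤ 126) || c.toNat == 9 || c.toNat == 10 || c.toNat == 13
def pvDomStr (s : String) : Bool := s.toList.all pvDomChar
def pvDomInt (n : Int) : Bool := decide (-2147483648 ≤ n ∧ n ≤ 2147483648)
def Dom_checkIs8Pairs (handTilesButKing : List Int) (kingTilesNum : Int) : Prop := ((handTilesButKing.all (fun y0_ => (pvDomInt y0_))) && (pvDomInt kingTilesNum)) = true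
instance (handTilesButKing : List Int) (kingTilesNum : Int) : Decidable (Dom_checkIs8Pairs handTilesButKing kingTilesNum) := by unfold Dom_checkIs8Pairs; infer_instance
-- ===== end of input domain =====

-- B replaces A's frequency dict + second scan over its keys by one pass toggling a set of
-- odd-count tiles; objective: simpler. (Equal return value on all inputs; no mutation involved.)

-- ===== PORT A =====
-- helper getTile2NumDict: counting loop over the tiles
def getTile2NumDict (tiles : List Int) : PySem.Dict Int Int :=
  tiles.foldl
    (fun d t => if !d.contains t then d.insert t 1 else d.insert t (d.getD t 0 + 1))
    PySem.Dict.empty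

def checkIs8Pairs (handTilesButKing : List Int) (kingTilesNum : Int) : Bool :=
  let tile2NumDict := getTile2NumDict handTilesButKing
  -- 'for tile in tile2NumDict: num = tile2NumDict[tile]' — tile is a key, so the getD default is never used
  let needNum : Int :=
    tile2NumDict.keys.foldl
      (fun n tile =>
        let num := tile2NumDict.getD tile 0
        if PySem.Int.mod num 2 == 1 then n + 1 else n) 0
  if needNum - kingTilesNum ≤ 1 then true else false

-- ===== PORT B =====
def checkIs8Pairs_alt (handTilesButKing : List Int) (kingTilesNum : Int) : Bool :=
  let oddSet : PySem.Set Int :=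
    handTilesButKing.foldl
      (fun s t => if PySem.Set.contains s t then PySem.Set.discard s t else PySem.Set.add s t)
      PySem.Set.empty
  decide (PySem.Set.len oddSet - kingTilesNum ≤ 1)

-- ===== PRECONDITION & SPEC =====
def Spec_checkIs8Pairs (handTilesButKing : List Int) (kingTilesNum : Int) (out : Bool) : Prop := out = checkIs8Pairs_alt handTilesButKing kingTilesNum
instance (handTilesButKing : List Int) (kingTilesNum : Int) (out : Bool) : Decidable (Spec_checkIs8Pairs handTilesButKing kingTilesNum out) := by unfold Spec_checkIs8Pairs; infer_instance

-- ===== CLAIM (what is proved, stated in full; the proofs are below) =====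
def Claim_equal_checkIs8Pairs : Prop := ∀ (handTilesButKing : List Int) (kingTilesNum : Int), Dom_checkIs8Pairs handTilesButKing kingTilesNum → Spec_checkIs8Pairs handTilesButKing kingTilesNum (checkIs8Pairs handTilesButKing kingTilesNum)

-- ===== LEMMAS AND PROOFS =====

-- A's two insert branches are one and the same update (an absent key has getD = 0)
theorem getTile2NumDict_eq_counter (tiles : List Int) :
    getTile2NumDict tiles = PySem.Dict.counter tiles := by
  rw [← PySem.Dict.foldl_insert_getD_add_one_eq_counter]
  unfold getTile2NumDict
  congr 1
  funext d t
  by_cases h : d.contains t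
  · simp [h]
  · simp [h, PySem.Dict.getD_of_not_contains d 0 (by simpa using h)]

theorem mod_two_cast (n : Nat) :
    (PySem.Int.mod (n : Int) 2 == 1) = decide (n % 2 = 1) := by
  simp only [PySem.Int.mod, Int.fmod_eq_emod]
  rw [Bool.eq_iff_iff]
  simp; omega

-- the toggled set holds exactly the tiles with odd count, without duplicates
theorem toggle_spec (hs : List Int) :
    (hs.foldl
      (fun s t => if PySem.Set.contains s t then PySem.Set.discard s t else PySem.Set.add s t)
      PySem.Set.empty).Nodup ∧
    ∀ t, t ∈ (hs.foldl
      (fun s t => if PySem.Set.contains s t then PySem.Set.discard s t else PySem.Set.add s t)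
      PySem.Set.empty) ↔ hs.count t % 2 = 1 := by
  induction hs using List.reverseRecOn with
  | nil => simp [PySem.Set.empty]
  | append_singleton xs x ih =>
    obtain ⟨hnd, hmem⟩ := ih
    rw [List.foldl_append]
    set s := xs.foldl
      (fun s t => if PySem.Set.contains s t then PySem.Set.discard s t else PySem.Set.add s t)
      PySem.Set.empty with hs_def
    constructor
    · by_cases h : x ∈ s
      · simpa [h] using PySem.Set.nodup_discard s x hnd
      · simpa [h] using PySem.Set.nodup_add s x hnd
    · intro t
      by_cases h : x ∈ s
      · have hx : xs.count x % 2 = 1 := (hmem x).1 h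
        simp only [List.foldl_cons, List.foldl_nil, PySem.Set.contains_iff]
        rw [if_pos h]
        rw [PySem.Set.mem_discard, hmem, List.count_append]
        by_cases ht : t = x
        · subst ht; simp; omega
        · simp [ht, Ne.symm ht]
      · have hx : ¬ xs.count x % 2 = 1 := fun hc => h ((hmem x).2 hc)
        simp only [List.foldl_cons, List.foldl_nil, PySem.Set.contains_iff]
        rw [if_neg h]
        rw [PySem.Set.mem_add, hmem, List.count_append]
        by_cases ht : t = x
        · subst ht; simp; omega
        · simp [ht, Ne.symm ht]

theorem checkIs8Pairs_eq (hs : List Int) (k : Int) :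
    checkIs8Pairs hs k = checkIs8Pairs_alt hs k := by
  obtain ⟨hnd, hmem⟩ := toggle_spec hs
  unfold checkIs8Pairs checkIs8Pairs_alt
  rw [getTile2NumDict_eq_counter]
  simp only [PySem.Dict.keys_counter, PySem.Dict.getD_counter, mod_two_cast,
    PySem.List.foldl_count_if, zero_add]
  have hperm :
      ((PySem.Set.ofList hs).filter (fun t => decide (hs.count t % 2 = 1))).Perm
        (hs.foldl
          (fun s t => if PySem.Set.contains s t then PySem.Set.discard s t else PySem.Set.add s t)
          PySem.Set.empty) := by
    rw [List.perm_ext_iff_of_nodup (List.Nodup.filter _ (PySem.Set.nodup_ofList hs)) hnd]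
    intro t
    simp only [List.mem_filter, PySem.Set.mem_ofList, hmem, decide_eq_true_eq]
    constructor
    · rintro ⟨-, h⟩; exact h
    · intro h
      refine ⟨?_, h⟩
      exact List.count_pos_iff.mp (by omega)
  have hlen : (PySem.Set.ofList hs).countP (fun t => decide (hs.count t % 2 = 1)) =
      (hs.foldl
        (fun s t => if PySem.Set.contains s t then PySem.Set.discard s t else PySem.Set.add s t)
        PySem.Set.empty).length := by
    rw [← hperm.length_eq, List.countP_eq_length_filter]
  rw [hlen]
  simp [PySem.Set.len]

-- ===== VERDICT (by name: the statement is the Claim_ definition above) =====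
theorem checkIs8Pairs_spec : Claim_equal_checkIs8Pairs := by
  intro hs k _
  unfold Spec_checkIs8Pairs
  exact checkIs8Pairs_eq hs k
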